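-- pv_equiv track=rewrite | github.com/SriyaM/deep_fMRI | encoding/ridge_utils/dsutils.py | find_matching_index
-- ===== SOURCE A (Python) =====
-- def find_matching_index(word_list, current_idx, n):
--     """
--     Finds the index of the closest match of a sequence of `n` words before the current index.
--
--     Args:
--         word_list: List of words in the story.
--         current_idx: Index of the word to start matching.
--         n: Number of words to match.
--
--     Returns:
--         The index of the matching sequence if found, otherwise None.
--     """
--     if current_idx < n:
--         return None
--
--     current_sequence = word_list[current_idx - n:current_idx]
--
--     for i in range(current_idx - n):
--         if word_list[i:i + n] == current_sequence:
--             return i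
--
--     return None
-- ===== SOURCE B (Python) =====
-- def find_matching_index(word_list, current_idx, n):
--     """Inverted-index re-implementation: one pass builds word -> positions,
--     candidate start positions are the intersection of the shifted position
--     sets of the pattern words, and the answer is the smallest candidate."""
--     if current_idx < n:
--         return None
--
--     pattern = word_list[current_idx - n:current_idx]
--     m = len(pattern)
--     if m == 0:
--         return 0 if current_idx - n > 0 else None
--
--     # positions usable by any window: 0 .. current_idx - 2
--     text = word_list[:current_idx - 1]
--     index = {}
--     for j, w in enumerate(text):
--         index.setdefault(w, []).append(j)
--
--     candidates = set(index.get(pattern[0], []))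
--     for k in range(1, m):
--         candidates = {q - k for q in index.get(pattern[k], [])} & candidates
--
--     return min(candidates) if candidates else None
-- ===== Notes on version B (the rewrite author's own statement) =====
-- stated objective: alternative
-- what changed: Instead of comparing the n-word window at every earlier start index against the current sequence, B builds an inverted index word->positions in one pass over the prefix, intersects the shifted position sets of the n pattern words, and returns the minimum candidate.
-- outside the precondition, e.g. on find_matching_index(['a', 'b', 'a'], 5, 1): A returns 3, B returns 0; on find_matching_index(['a', 'b', 'c'], 3, -1): A returns 1, B returns 0
import Mathlib
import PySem

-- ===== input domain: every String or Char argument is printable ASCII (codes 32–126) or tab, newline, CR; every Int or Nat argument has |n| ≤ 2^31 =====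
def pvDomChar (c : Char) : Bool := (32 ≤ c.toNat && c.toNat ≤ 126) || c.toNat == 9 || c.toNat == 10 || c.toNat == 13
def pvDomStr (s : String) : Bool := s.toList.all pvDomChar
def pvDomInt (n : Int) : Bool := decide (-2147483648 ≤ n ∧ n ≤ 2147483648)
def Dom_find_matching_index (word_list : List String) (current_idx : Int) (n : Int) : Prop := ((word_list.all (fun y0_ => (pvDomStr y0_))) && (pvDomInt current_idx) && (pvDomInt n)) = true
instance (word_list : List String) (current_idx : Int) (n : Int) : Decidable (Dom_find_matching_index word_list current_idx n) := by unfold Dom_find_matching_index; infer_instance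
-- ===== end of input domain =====

-- B replaces A's scan of every window by an inverted index (word -> positions) built in
-- one pass, intersecting the shifted position sets of the pattern words and taking the
-- minimum candidate: an alternative algorithm of similar cost, not claimed faster.

-- ===== PORT A =====
-- the 'for i in range(current_idx - n)' loop with its early 'return i'
def fmiLoop (word_list : List String) (n : Int) (current_sequence : List String)
    (stop i : Int) : Option Int :=
  if i < stop then
    if PySem.List.slice word_list (some i) (some (i + n)) == current_sequence then some i
    else fmiLoop word_list n current_sequence stop (i + 1)
  else none
termination_by (stop - i).toNat
decreasing_by omega

def find_matching_index (word_list : List String) (current_idx : Int) (n : Int) : Option Int :=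
  if current_idx < n then none
  else
    let current_sequence := PySem.List.slice word_list (some (current_idx - n)) (some current_idx)
    fmiLoop word_list n current_sequence (current_idx - n) 0

-- ===== PORT B =====
def find_matching_index_alt (word_list : List String) (current_idx : Int) (n : Int) : Option Int :=
  if current_idx < n then none
  else
    let pattern := PySem.List.slice word_list (some (current_idx - n)) (some current_idx)
    let m : Int := PySem.List.len pattern
    if m = 0 then (if current_idx - n > 0 then some 0 else none)
    else
      let text := PySem.List.slice word_list none (some (current_idx - 1))
      -- for j, w in enumerate(text): index.setdefault(w, []).append(j)
      let index := (PySem.List.enumerate text).foldl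
        (fun d p => d.modify p.2 [] (fun l => l ++ [p.1])) PySem.Dict.empty
      let candidates := PySem.Set.ofList (index.getD (PySem.List.pyGetD pattern 0 "") [])
      let candidates := (PySem.List.pyRange 1 m 1).foldl
        (fun c k => PySem.Set.inter
          (PySem.Set.ofList ((index.getD (PySem.List.pyGetD pattern k "") []).map (fun q => q - k))) c)
        candidates
      PySem.List.min? candidates id

-- ===== PRECONDITION & SPEC =====
-- Pre_ admits the function's natural domain (a nonnegative word count n with an index
-- current_idx ≤ len(word_list)) plus the inputs that trivially return (current_idx < n,
-- n = 0, the empty list); outside it (negative n, or current_idx past the end of a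
-- non-empty list) A's values come from Python's slice clamping/wraparound and are accidental.
def Pre_find_matching_index (word_list : List String) (current_idx : Int) (n : Int) : Prop :=
  current_idx < n ∨ n = 0 ∨ word_list = [] ∨ (0 ≤ n ∧ current_idx ≤ (word_list.length : Int))
instance (word_list : List String) (current_idx : Int) (n : Int) : Decidable (Pre_find_matching_index word_list current_idx n) := by unfold Pre_find_matching_index; infer_instance
def pvWitness_find_matching_index : List String × Int × Int := (["a", "b", "a", "b"], 4, 2)

def Spec_find_matching_index (word_list : List String) (current_idx : Int) (n : Int) (out : Option Int) : Prop := out = find_matching_index_alt word_list current_idx n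
instance (word_list : List String) (current_idx : Int) (n : Int) (out : Option Int) : Decidable (Spec_find_matching_index word_list current_idx n out) := by unfold Spec_find_matching_index; infer_instance

-- ===== CLAIM (what is proved, stated in full; the proofs are below) =====
def Claim_equal_find_matching_index : Prop := ∀ (word_list : List String) (current_idx : Int) (n : Int), Dom_find_matching_index word_list current_idx n → Pre_find_matching_index word_list current_idx n → Spec_find_matching_index word_list current_idx n (find_matching_index word_list current_idx n)

-- ===== LEMMAS AND PROOFS =====

-- membership in Python's enumerate
theorem mem_enumerate_iff {α : Type} (xs : List α) (s j : Int) (w : α) :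
    (j, w) ∈ PySem.List.enumerate xs s ↔
      ∃ k : Nat, k < xs.length ∧ j = s + (k : Int) ∧ xs[k]? = some w := by
  induction xs generalizing s with
  | nil => simp [PySem.List.enumerate]
  | cons x t ih =>
    simp only [PySem.List.enumerate, List.mem_cons, ih]
    constructor
    · rintro (h | ⟨k, hk, hj, hw⟩)
      · injection h with h1 h2
        subst h1; subst h2
        exact ⟨0, by simp, by simp, by simp⟩
      · exact ⟨k + 1, by simpa using hk, by push_cast at hj ⊢; omega, by simpa using hw⟩
    · rintro ⟨k, hk, hj, hw⟩
      cases k with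
      | zero =>
        left
        have hx : x = w := by simpa using hw
        have hs : j = s := by simpa using hj
        rw [hs, hx]
      | succ k =>
        right
        exact ⟨k, by simpa using hk, by push_cast at hj ⊢; omega, by simpa using hw⟩

-- membership in the inverted index built by the setdefault/append loop
theorem mem_index_iff (text : List String) (w : String) (j : Int) :
    j ∈ (((PySem.List.enumerate text).foldl
        (fun d p => d.modify p.2 [] (fun l => l ++ [p.1])) PySem.Dict.empty).getD w []) ↔
      ∃ k : Nat, k < text.length ∧ j = (k : Int) ∧ text[k]? = some w := by
  have hfold : ((PySem.List.enumerate text).foldl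
      (fun d p => d.modify p.2 [] (fun l => l ++ [p.1])) PySem.Dict.empty)
      = (((PySem.List.enumerate text).map Prod.swap).foldl
        (fun d p => d.modify p.1 [] (fun l => l ++ [p.2])) PySem.Dict.empty) := by
    rw [List.foldl_map]
    simp [Prod.swap]
  rw [hfold, PySem.Dict.getD_foldl_modify_append]
  simp only [PySem.Dict.getD_empty, List.nil_append, List.mem_map, List.mem_filter]
  constructor
  · rintro ⟨p, ⟨⟨q, hq, rfl⟩, hpw⟩, rfl⟩
    have hqw : q.2 = w := by simpa using hpw
    obtain ⟨k, hk, hj, hw'⟩ := (mem_enumerate_iff text 0 q.1 q.2).mp (by simpa using hq)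
    exact ⟨k, hk, by simpa using hj, by rw [← hqw]; exact hw'⟩
  · rintro ⟨k, hk, rfl, hw⟩
    refine ⟨(w, (k : Int)), ⟨⟨((k : Int), w), ?_, rfl⟩, by simp⟩, rfl⟩
    exact (mem_enumerate_iff text 0 (k : Int) w).mpr ⟨k, hk, by simp, hw⟩

-- membership after the intersection loop
theorem mem_foldl_inter (f : Int → List Int) (l : List Int) (s : List Int) (i : Int) :
    i ∈ l.foldl (fun c k => PySem.Set.inter (PySem.Set.ofList (f k)) c) s ↔
      i ∈ s ∧ ∀ k ∈ l, i ∈ f k := by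
  induction l generalizing s with
  | nil => simp
  | cons x t ih =>
    simp only [List.foldl_cons, ih, PySem.Set.mem_inter, PySem.Set.mem_ofList, List.mem_cons]
    constructor
    · rintro ⟨⟨h1, h2⟩, h3⟩
      exact ⟨h2, fun k hk => hk.elim (fun e => e ▸ h1) (h3 k)⟩
    · rintro ⟨h2, h3⟩
      exact ⟨⟨h3 x (Or.inl rfl), h2⟩, fun k hk => h3 k (Or.inr hk)⟩

-- find? on a strictly increasing list returns the least element satisfying the predicate
theorem find?_least {l : List Int} (hl : l.Pairwise (· < ·)) {p : Int → Bool} {i : Int}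
    (h : l.find? p = some i) : ∀ j ∈ l, p j → i ≤ j := by
  induction l with
  | nil => simp at h
  | cons x t ih =>
    rw [List.find?_cons] at h
    rcases List.pairwise_cons.mp hl with ⟨hx, ht⟩
    intro j hj hpj
    rcases List.mem_cons.mp hj with rfl | hj
    · by_cases hp : p j
      · simp [hp] at h; omega
      · exact absurd hpj hp
    · by_cases hp : p x
      · simp [hp] at h
        exact le_of_lt (h ▸ hx j hj)
      · simp [hp] at h
        exact ih ht h j hj hpj

-- the ∀k elementwise condition over the prefix is exactly "i starts an earlier copy of the pattern"
theorem window_iff (wl : List String) (ci n i : Int)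
    (h1 : 1 ≤ n) (hnc : n ≤ ci) (hcL : ci ≤ (wl.length : Int)) :
    ((∀ k : Int, 0 ≤ k → k < n →
        0 ≤ i + k ∧ (i + k).toNat < (List.take (ci - 1).toNat wl).length ∧
        (List.take (ci - 1).toNat wl)[(i + k).toNat]? =
          some (PySem.List.pyGetD (List.take n.toNat (List.drop (ci - n).toNat wl)) k "")) ↔
      (0 ≤ i ∧ i < ci - n ∧
        PySem.List.slice wl (some i) (some (i + n)) =
          List.take n.toNat (List.drop (ci - n).toNat wl))) := by
  have htlen : (List.take (ci - 1).toNat wl).length = (ci - 1).toNat := by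
    simp [List.length_take]; omega
  have hplen : (List.take n.toNat (List.drop (ci - n).toNat wl)).length = n.toNat := by
    simp [List.length_take, List.length_drop]; omega
  constructor
  · intro h
    have h0 := h 0 le_rfl (by omega)
    have hi0 : 0 ≤ i := by have := h0.1; omega
    have hlast := h (n - 1) (by omega) (by omega)
    have hilt : i < ci - n := by
      have := hlast.2.1; rw [htlen] at this; omega
    refine ⟨hi0, hilt, ?_⟩
    rw [PySem.List.slice_toNat wl hi0 (by omega)]
    apply List.ext_getElem?
    intro kk
    by_cases hkk : kk < n.toNat
    · have hk := h (kk : Int) (by omega) (by omega)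
      obtain ⟨-, hlt2, heq2⟩ := hk
      have hidx : (i + (kk : Int)).toNat = i.toNat + kk := by omega
      have hwlt : i.toNat + kk < (ci - 1).toNat := by rw [htlen] at hlt2; omega
      have hwl : wl[(i.toNat + kk)]? = (List.take (ci - 1).toNat wl)[(i + (kk : Int)).toNat]? := by
        rw [hidx, List.getElem?_take_of_lt hwlt]
      have hpk : PySem.List.pyGetD (List.take n.toNat (List.drop (ci - n).toNat wl)) (kk : Int) ""
          = (List.take n.toNat (List.drop (ci - n).toNat wl)).getD kk "" :=
        PySem.List.pyGetD_natCast _ _ _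
      rw [hpk] at heq2
      have hkkp : kk < (List.take n.toNat (List.drop (ci - n).toNat wl)).length := by omega
      rw [List.getD_eq_getElem _ _ hkkp] at heq2
      have hlhs : (List.take ((i + n).toNat - i.toNat) (List.drop i.toNat wl))[kk]? = wl[i.toNat + kk]? := by
        rw [List.getElem?_take_of_lt (by omega), List.getElem?_drop]
      rw [hlhs, hwl, heq2]
      rw [List.getElem?_eq_getElem hkkp]
    · have hl1 : (List.take ((i + n).toNat - i.toNat) (List.drop i.toNat wl)).length ≤ n.toNat := by
        simp [List.length_take]; omega
      rw [List.getElem?_eq_none (by omega), List.getElem?_eq_none (by omega)]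
  · rintro ⟨hi0, hilt, heq⟩ k hk0 hkn
    refine ⟨by omega, by rw [htlen]; omega, ?_⟩
    rw [PySem.List.slice_toNat wl hi0 (by omega)] at heq
    have hk' : k = ((k.toNat : Nat) : Int) := by omega
    rw [hk', PySem.List.pyGetD_natCast]
    have hkkp : k.toNat < (List.take n.toNat (List.drop (ci - n).toNat wl)).length := by omega
    rw [List.getD_eq_getElem _ _ hkkp]
    have hidx : (i + (k.toNat : Int)).toNat = i.toNat + k.toNat := by omega
    rw [hidx, List.getElem?_take_of_lt (by omega)]
    have := congrArg (fun l => l[k.toNat]?) heq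
    simp only at this
    rw [List.getElem?_take_of_lt (by omega), List.getElem?_drop] at this
    rw [this, List.getElem?_eq_getElem hkkp]

-- membership in B's candidate set, stated on B's literal term
theorem cand_mem (wl : List String) (ci n : Int)
    (h1 : 1 ≤ n) (hnc : n ≤ ci) (hcL : ci ≤ (wl.length : Int)) (i : Int) :
    (i ∈ (PySem.List.pyRange 1 (PySem.List.len (PySem.List.slice wl (some (ci - n)) (some ci))) 1).foldl
        (fun c k => PySem.Set.inter
          (PySem.Set.ofList ((((PySem.List.enumerate (PySem.List.slice wl none (some (ci - 1)))).foldl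
              (fun d p => d.modify p.2 [] (fun l => l ++ [p.1])) PySem.Dict.empty).getD
            (PySem.List.pyGetD (PySem.List.slice wl (some (ci - n)) (some ci)) k "") []).map (fun q => q - k))) c)
        (PySem.Set.ofList (((PySem.List.enumerate (PySem.List.slice wl none (some (ci - 1)))).foldl
              (fun d p => d.modify p.2 [] (fun l => l ++ [p.1])) PySem.Dict.empty).getD
            (PySem.List.pyGetD (PySem.List.slice wl (some (ci - n)) (some ci)) 0 "") []))) ↔
      (0 ≤ i ∧ i < ci - n ∧ PySem.List.slice wl (some i) (some (i + n)) =
        PySem.List.slice wl (some (ci - n)) (some ci)) := by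
  have hslice_seq : PySem.List.slice wl (some (ci - n)) (some ci)
      = List.take n.toNat (List.drop (ci - n).toNat wl) := by
    rw [PySem.List.slice_toNat wl (by omega) (by omega)]
    congr 1
    omega
  have hslice_text : PySem.List.slice wl none (some (ci - 1)) = List.take (ci - 1).toNat wl :=
    PySem.List.slice_to wl (by omega)
  have hplen : (PySem.List.len (PySem.List.slice wl (some (ci - n)) (some ci))) = n := by
    rw [PySem.List.len_eq, hslice_seq]
    simp [List.length_take, List.length_drop]
    omega
  rw [hplen]
  simp only [hslice_seq, hslice_text]
  rw [mem_foldl_inter, PySem.Set.mem_ofList, ← window_iff wl ci n i h1 hnc hcL]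
  constructor
  · rintro ⟨hz, hrest⟩ k hk0 hkn
    by_cases hk : k = 0
    · subst hk
      obtain ⟨kk, hkk, hjk, hw⟩ := (mem_index_iff _ _ _).mp hz
      refine ⟨by omega, by omega, ?_⟩
      have hik : (i + 0).toNat = kk := by omega
      rw [hik]
      exact hw
    · have hkmem : k ∈ PySem.List.pyRange 1 n 1 := PySem.List.mem_pyRange_one.mpr ⟨by omega, hkn⟩
      obtain ⟨q, hq, hqe⟩ := List.mem_map.mp (hrest k hkmem)
      obtain ⟨kk, hkk, hjk, hw⟩ := (mem_index_iff _ _ _).mp hq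
      refine ⟨by omega, by omega, ?_⟩
      have hik : (i + k).toNat = kk := by omega
      rw [hik]
      exact hw
  · intro h
    constructor
    · have h0 := h 0 le_rfl (by omega)
      exact (mem_index_iff _ _ _).mpr ⟨(i + 0).toNat, h0.2.1, by omega, h0.2.2⟩
    · intro k hk
      have hk' := PySem.List.mem_pyRange_one.mp hk
      have hkc := h k (by omega) (by omega)
      exact List.mem_map.mpr
        ⟨i + k, (mem_index_iff _ _ _).mpr ⟨(i + k).toNat, hkc.2.1, by omega, hkc.2.2⟩, by omega⟩

-- the loop of port A is find? over the materialized range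
theorem fmiLoop_eq (wl : List String) (n : Int) (seq : List String) (stop : Int) :
    ∀ (k : Nat) (i : Int), (stop - i).toNat = k →
      fmiLoop wl n seq stop i =
        (PySem.List.pyRange i stop 1).find?
          (fun j => PySem.List.slice wl (some j) (some (j + n)) == seq) := by
  intro k
  induction k with
  | zero =>
    intro i hk
    rw [fmiLoop, if_neg (by omega), PySem.List.pyRange_one_eq_nil (by omega)]
    rfl
  | succ k ih =>
    intro i hk
    by_cases h : i < stop
    · rw [fmiLoop, if_pos h, PySem.List.pyRange_one_cons h, List.find?_cons]
      by_cases hp : (PySem.List.slice wl (some i) (some (i + n)) == seq) = true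
      · rw [if_pos hp]
        simp [hp]
      · rw [if_neg hp]
        simp only [Bool.not_eq_true] at hp
        rw [hp]
        exact ih (i + 1) (by omega)
    · rw [fmiLoop, if_neg h, PySem.List.pyRange_one_eq_nil (by omega)]
      rfl

-- the first hit of an increasing scan is the minimum of the hit set
theorem find?_eq_min? (r : List Int) (hr : r.Pairwise (· < ·)) (p : Int → Bool) (cand : List Int)
    (hc : ∀ i, i ∈ cand ↔ (i ∈ r ∧ p i = true)) :
    r.find? p = PySem.List.min? cand id := by
  cases hA : r.find? p with
  | none =>
    have hnone := List.find?_eq_none.mp hA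
    have hnil : cand = [] := by
      apply List.eq_nil_iff_forall_not_mem.mpr
      intro x hx
      obtain ⟨hxr, hxp⟩ := (hc x).mp hx
      exact hnone x hxr hxp
    rw [hnil]
    exact ((PySem.List.min?_eq_none_iff [] id).mpr rfl).symm
  | some i =>
    have hp := List.find?_some hA
    have hmem := List.mem_of_find?_eq_some hA
    have hleast := find?_least hr hA
    have hic : i ∈ cand := (hc i).mpr ⟨hmem, hp⟩
    cases hmv : PySem.List.min? cand id with
    | none =>
      have hnil := (PySem.List.min?_eq_none_iff cand id).mp hmv
      rw [hnil] at hic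
      simp at hic
    | some v =>
      obtain ⟨hvr, hvp⟩ := (hc v).mp (PySem.List.min?_mem hmv)
      have h1 : i ≤ v := hleast v hvr hvp
      have h2 : v ≤ i := PySem.List.min?_isMin hmv i hic
      rw [le_antisymm h1 h2]

-- any slice of the empty list is empty
theorem slice_nil (a? b? : Option Int) : PySem.List.slice ([] : List String) a? b? = [] := by
  cases hh : PySem.List.slice ([] : List String) a? b? with
  | nil => rfl
  | cons a l =>
    have ha : a ∈ ([] : List String) := PySem.List.mem_of_mem_slice _ _ _ (by rw [hh]; simp)
    simp at ha

-- A and B agree on every admitted input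
theorem main_eq (wl : List String) (ci n : Int)
    (hpre : ci < n ∨ n = 0 ∨ wl = [] ∨ (0 ≤ n ∧ ci ≤ (wl.length : Int))) :
    find_matching_index wl ci n = find_matching_index_alt wl ci n := by
  by_cases hlt : ci < n
  · simp [find_matching_index, find_matching_index_alt, hlt]
  · have hnc : n ≤ ci := not_lt.mp hlt
    simp only [find_matching_index, find_matching_index_alt, if_neg hlt]
    rw [fmiLoop_eq wl n _ (ci - n) (ci - n - 0).toNat 0 rfl]
    by_cases hdeg : n = 0 ∨ wl = []
    · -- degenerate inputs: the matched sequence is empty, the first window matches at once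
      have hseqnil : PySem.List.slice wl (some (ci - n)) (some ci) = [] := by
        rcases hdeg with rfl | rfl
        · rw [PySem.List.slice_toNat wl (by omega) (by omega)]
          simp
        · exact slice_nil _ _
      have hm0 : PySem.List.len (PySem.List.slice wl (some (ci - n)) (some ci)) = 0 := by
        rw [PySem.List.len_eq, hseqnil]
        rfl
      rw [if_pos hm0]
      by_cases hci : ci - n > 0
      · rw [if_pos hci]
        rw [PySem.List.pyRange_one_cons (by omega : (0:Int) < ci - n)]
        rw [List.find?_cons_of_pos]
        rw [hseqnil, beq_iff_eq]
        have hwin : PySem.List.slice wl (some 0) (some (0 + n)) = [] := by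
          rcases hdeg with rfl | rfl
          · rw [PySem.List.slice_toNat wl le_rfl (by omega)]
            simp
          · exact slice_nil _ _
        rw [hwin]
      · rw [if_neg hci]
        rw [PySem.List.pyRange_one_eq_nil (by omega)]
        rfl
    · rcases not_or.mp hdeg with ⟨hnne, hwlne⟩
      have hn0 : 0 ≤ n := by
        rcases hpre with h | h | h | ⟨h, -⟩
        · omega
        · omega
        · exact absurd h hwlne
        · exact h
      have hcL : ci ≤ (wl.length : Int) := by
        rcases hpre with h | h | h | ⟨-, h⟩
        · omega
        · exact absurd h hnne
        · exact absurd h hwlne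
        · exact h
      have hc0 : 0 ≤ ci := le_trans hn0 hnc
      have hslice_seq : PySem.List.slice wl (some (ci - n)) (some ci)
          = List.take n.toNat (List.drop (ci - n).toNat wl) := by
        rw [PySem.List.slice_toNat wl (by omega) (by omega)]
        congr 1
        omega
      have hseqlen : (PySem.List.slice wl (some (ci - n)) (some ci)).length = n.toNat := by
        rw [hslice_seq]
        simp [List.length_take, List.length_drop]
        omega
      have hmne : ¬ (PySem.List.len (PySem.List.slice wl (some (ci - n)) (some ci)) = 0) := by
        rw [PySem.List.len_eq, hseqlen]
        simp
        omega
      rw [if_neg hmne]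
      refine find?_eq_min? _ (PySem.List.pairwise_lt_pyRange_one _ _) _ _ (fun i => ?_)
      rw [cand_mem wl ci n (by omega) hnc hcL i]
      constructor
      · rintro ⟨h1, h2, h3⟩
        exact ⟨PySem.List.mem_pyRange_one.mpr ⟨h1, h2⟩, beq_iff_eq.mpr h3⟩
      · rintro ⟨hm, hp⟩
        obtain ⟨hma, hmb⟩ := PySem.List.mem_pyRange_one.mp hm
        exact ⟨hma, hmb, beq_iff_eq.mp hp⟩

-- ===== VERDICT (by name: the statement is the Claim_ definition above) =====
theorem find_matching_index_spec : Claim_equal_find_matching_index := by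
  intro wl ci n _hdom hpre
  unfold Spec_find_matching_index
  exact main_eq wl ci n hpre
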